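-- pv_equiv track=rewrite | github.com/dehaenw/blincs | blincs.py | seq_to_adj
-- ===== SOURCE A (Python) =====
-- from collections import Counter
--
-- def seq_is_ok(seq):
--     """
--     check if ring openings are closed and if edges and degrees match.
--     """
--     ok = True
--     rings = [num for num in seq if num < 0]
--     degrees = [num if num > 0 else 0 for num in seq ]
--     parity = sum([0 if c%2==0 else 1 for c in dict(Counter(rings)).values()])
--     if parity > 0:
--         ok = False
--     if sum(degrees)/2 != len(seq)-len(rings)/2-1:
--         ok = False
--     return ok
--
-- def seq_to_adj(seq):
--     """
--     this function takes an sequence of vertex degrees and turns it into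
--     connectivity information (an array of index pairs). For example:
--     `[3,2,1,1,2,1]`
--     turns into
--     `[(0,1),(0,2),(0,3),(1,4),(4,5)]`
--     the integers correspond to the degree of vertex, if the degree is n,
--     the n-1 (or n for the first, parentless element) next elements are the
--     children of that vertex. This can describe any tree.
--     To broaden this approach for graphs, ring opening and closing operations
--     can be added, analogously to those used in SMILES notation. These numbers
--     are notated using a negative sign. For example:
--     `1,3,-1,2,2,-1`
--     corresponds to
--     `[(0,1),(1,3),(1,2),(2,3)]`
--     """
--     adj = []
--     if not seq_is_ok(seq):
--         return adj
--     ring_dict = {}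
--     n_atoms = sum([num>0 for num in seq])
--     curr_idx_parent = 0
--     curr_idx_child = 0
--     curr_atom = 0
--     curr_free_atom = 0
--     while curr_idx_parent < len(seq) and curr_atom<n_atoms:
--         while seq[curr_idx_parent] < 0:
--             curr_idx_parent += 1
--         deg = seq[curr_idx_parent]
--         parentless = 1 if curr_atom == 0 else 0
--         for i in range(deg-1+parentless):
--             curr_idx_child += 1
--             if seq[curr_idx_child] > 0:
--                 curr_free_atom += 1
--                 adj.append((curr_atom,curr_free_atom))
--             else:
--                 if seq[curr_idx_child] in ring_dict:
--                     ring_dict[seq[curr_idx_child]].append(curr_atom)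
--                 else:
--                     ring_dict[seq[curr_idx_child]] = [curr_atom]
--         curr_atom += 1
--         curr_idx_parent += 1
--     for k in ring_dict:
--         ring_atoms = ring_dict[k]
--         for i in range(len(ring_atoms)//2):
--             adj.append((ring_atoms[2*i],ring_atoms[2*i+1]))
--     return adj
-- ===== SOURCE B (Python) =====
-- from collections import Counter
--
-- def seq_is_ok(seq):
--     """
--     check if ring openings are closed and if edges and degrees match.
--     """
--     ok = True
--     rings = [num for num in seq if num < 0]
--     degrees = [num if num > 0 else 0 for num in seq ]
--     parity = sum([0 if c%2==0 else 1 for c in dict(Counter(rings)).values()])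
--     if parity > 0:
--         ok = False
--     if sum(degrees)/2 != len(seq)-len(rings)/2-1:
--         ok = False
--     return ok
--
-- def seq_to_adj(seq):
--     if not seq_is_ok(seq):
--         return []
--     # pass 1: expand each atom's child slots into a flat parent table:
--     # parents[j] is the atom that owns child token j+1
--     parents = []
--     atom = -1
--     for tok in seq:
--         if tok > 0:
--             atom += 1
--             parents += [atom] * (tok if atom == 0 else tok - 1)
--     # pass 2: walk the child tokens paired with their parents
--     adj = []
--     ring_dict = {}
--     free = 0
--     for parent, tok in zip(parents, seq[1:]):
--         if tok > 0:
--             free += 1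
--             adj.append((parent, free))
--         else:
--             ring_dict.setdefault(tok, []).append(parent)
--     # pair up ring partners
--     for ring_atoms in ring_dict.values():
--         it = iter(ring_atoms)
--         adj.extend(zip(it, it))
--     return adj
-- ===== Notes on version B (the rewrite author's own statement) =====
-- stated objective: alternative
-- what changed: B replaces A's interleaved dual-cursor while-loop (parent pointer skipping negatives, child cursor, per-atom inner range loop) by two flat passes: it first expands every atom's child slots into a precomputed parents table, then walks the token stream zipped against that table emitting edges/ring entries, and pairs ring partners by zipping an iterator with itself.
-- outside the precondition, e.g. on seq_to_adj([0, 2]): A returns [], B returns [(0, 1)]; on seq_to_adj([2, 0]): A raises IndexError, B returns []; on seq_to_adj([1, 3, 0]): A raises IndexError, B returns [(0, 1)]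
import Mathlib
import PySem

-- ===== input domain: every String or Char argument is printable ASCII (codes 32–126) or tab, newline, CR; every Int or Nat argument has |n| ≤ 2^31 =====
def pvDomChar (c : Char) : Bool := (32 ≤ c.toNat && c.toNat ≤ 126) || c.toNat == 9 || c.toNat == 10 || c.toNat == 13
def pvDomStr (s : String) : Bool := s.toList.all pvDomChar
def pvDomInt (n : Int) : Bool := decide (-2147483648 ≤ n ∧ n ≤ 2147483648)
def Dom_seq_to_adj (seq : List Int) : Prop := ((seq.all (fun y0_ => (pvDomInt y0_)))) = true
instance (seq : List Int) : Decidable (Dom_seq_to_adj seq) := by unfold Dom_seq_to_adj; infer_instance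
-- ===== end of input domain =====

-- B replaces A's interleaved dual-cursor while-loop by two flat passes: it first expands
-- every atom's child slots into a precomputed parents table, then walks the token stream
-- zipped against that table; ring partners are paired by consecutive-pair grouping
-- (Python's zip(it, it)).  Objective: alternative algorithm, same O(n) cost.

-- ===== PORT A =====
-- shared helper: seq_is_ok (identical in both Python files).  Python compares
-- sum(degrees)/2 != len(seq)-len(rings)/2-1 with float division; both sides are exact
-- half-integers here, so the comparison below, multiplied by 2 over Int, is exact.
def seq_is_ok (seq : List Int) : Bool :=
  let rings := seq.filter (fun num => num < 0)
  let degrees := seq.map (fun num => if num > 0 then num else 0)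
  let parity := ((PySem.Dict.counter rings).values.map
    (fun c => if PySem.Int.mod c 2 == 0 then (0 : Int) else 1)).sum
  let ok := true
  let ok := if parity > 0 then false else ok
  let ok := if degrees.sum ≠ 2 * (seq.length : Int) - (rings.length : Int) - 2 then false else ok
  ok

-- the inner `while seq[curr_idx_parent] < 0` skip; when it runs off the end Python raises
-- IndexError (excluded by Pre_), here we just return seq.length
def skipNeg (seq : List Int) (i : Nat) : Nat :=
  if h : i < seq.length then
    if seq[i] < 0 then skipNeg seq (i + 1) else i
  else i
termination_by seq.length - i

-- body of A's `for i in range(deg-1+parentless)` child loop; state (adj, ring_dict, curr_idx_child, curr_free_atom)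
def stepA (seq : List Int) (atom : Int)
    (st : List (Int × Int) × PySem.Dict Int (List Int) × Nat × Int) (_i : Int) :
    List (Int × Int) × PySem.Dict Int (List Int) × Nat × Int :=
  let (adj, rd, idxC, free) := st
  let idxC := idxC + 1
  let c := PySem.List.pyGetD seq (idxC : Int) 0
  if c > 0 then (adj ++ [(atom, free + 1)], rd, idxC, free + 1)
  else if rd.contains c then (adj, rd.insert c (rd.getD c [] ++ [atom]), idxC, free)
  else (adj, rd.insert c [atom], idxC, free)

-- A's outer while loop
def loopA (seq : List Int) (n_atoms : Int)
    (adj : List (Int × Int)) (rd : PySem.Dict Int (List Int))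
    (idxP idxC : Nat) (atom free : Int) :
    List (Int × Int) × PySem.Dict Int (List Int) :=
  if h : idxP < seq.length ∧ atom < n_atoms then
    let p := skipNeg seq idxP
    let deg := PySem.List.pyGetD seq (p : Int) 0
    let parentless : Int := if atom == 0 then 1 else 0
    let s := (PySem.List.pyRange 0 (deg - 1 + parentless) 1).foldl (stepA seq atom) (adj, rd, idxC, free)
    loopA seq n_atoms s.1 s.2.1 (p + 1) s.2.2.1 (atom + 1) s.2.2.2
  else (adj, rd)
termination_by (n_atoms - atom).toNat
decreasing_by omega

def seq_to_adj (seq : List Int) : List (Int × Int) :=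
  if !(seq_is_ok seq) then [] else
  let n_atoms := (seq.map (fun num => if num > 0 then (1 : Int) else 0)).sum
  let s := loopA seq n_atoms [] PySem.Dict.empty 0 0 0 0
  let adj := s.1
  let rd := s.2
  rd.keys.foldl (fun adj k =>
    let ring_atoms := rd.getD k []
    (PySem.List.pyRange 0 (PySem.Int.floordiv (ring_atoms.length : Int) 2) 1).foldl
      (fun adj i => adj ++ [(PySem.List.pyGetD ring_atoms (2 * i) 0,
                             PySem.List.pyGetD ring_atoms (2 * i + 1) 0)]) adj) adj

-- ===== PORT B =====
-- pass 1 body: `if tok > 0: atom += 1; parents += [atom] * (tok if atom == 0 else tok - 1)`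
def pstepB (st : List Int × Int) (tok : Int) : List Int × Int :=
  if tok > 0 then
    let atom := st.2 + 1
    (st.1 ++ PySem.List.pyRepeat [atom] (if atom == 0 then tok else tok - 1), atom)
  else st

-- pass 2 body: `for parent, tok in zip(parents, seq[1:])`; state (adj, ring_dict, free)
def zstepB (st : List (Int × Int) × PySem.Dict Int (List Int) × Int) (pt : Int × Int) :
    List (Int × Int) × PySem.Dict Int (List Int) × Int :=
  let (adj, rd, free) := st
  let (parent, tok) := pt
  if tok > 0 then (adj ++ [(parent, free + 1)], rd, free + 1)
  else
    -- ring_dict.setdefault(tok, []).append(parent)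
    let rd := rd.setdefault tok []
    (adj, rd.insert tok (rd.getD tok [] ++ [parent]), free)

-- `it = iter(ring_atoms); zip(it, it)` groups consecutive pairs, dropping a trailing odd element
def pairUp : List Int → List (Int × Int)
  | a :: b :: t => (a, b) :: pairUp t
  | _ => []

def seq_to_adj_alt (seq : List Int) : List (Int × Int) :=
  if !(seq_is_ok seq) then [] else
  let parents := (seq.foldl pstepB ([], -1)).1
  let s := (parents.zip (PySem.List.slice seq (some 1) none)).foldl zstepB ([], PySem.Dict.empty, 0)
  s.2.1.values.foldl (fun adj ring_atoms => adj ++ pairUp ring_atoms) s.1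

-- ===== PRECONDITION & SPEC =====
-- Pre_ excludes sequences containing a 0 token: 0 is neither a degree nor a ring marker in
-- this notation; A's negative-skip loop accidentally treats it as a degree-0 atom (raising
-- IndexError on many such inputs), while B lets it fall through to the ring branch — both
-- behaviours are accidental, so such inputs are excluded.
def Pre_seq_to_adj (seq : List Int) : Prop := (0 : Int) ∉ seq
instance (seq : List Int) : Decidable (Pre_seq_to_adj seq) := by unfold Pre_seq_to_adj; infer_instance
def pvWitness_seq_to_adj : List Int := [1, 3, -1, 2, 2, -1]
def Spec_seq_to_adj (seq : List Int) (out : List (Int × Int)) : Prop := out = seq_to_adj_alt seq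
instance (seq : List Int) (out : List (Int × Int)) : Decidable (Spec_seq_to_adj seq out) := by unfold Spec_seq_to_adj; infer_instance

-- ===== CLAIM (what is proved, stated in full; the proofs are below) =====
def Claim_equal_seq_to_adj : Prop := ∀ (seq : List Int), Dom_seq_to_adj seq → Pre_seq_to_adj seq → Spec_seq_to_adj seq (seq_to_adj seq)

-- ===== LEMMAS AND PROOFS =====

-- window width (number of child slots) of atom x.1 sitting at position x.2
def winW (seq : List Int) (x : Int × Int) : Int :=
  if x.1 == 0 then PySem.List.pyGetD seq x.2 0 else PySem.List.pyGetD seq x.2 0 - 1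

-- ---- proof-only reference implementation refB (positions-fold form), used as a bridge
-- between A's while loop and B's two staged passes ----

-- inner child-window step; state (adj, ring_dict, free)
def stepR (seq : List Int) (atom : Int)
    (st : List (Int × Int) × PySem.Dict Int (List Int) × Int) (child : Int) :
    List (Int × Int) × PySem.Dict Int (List Int) × Int :=
  let (adj, rd, free) := st
  let num := PySem.List.pyGetD seq child 0
  if num > 0 then (adj ++ [(atom, free + 1)], rd, free + 1)
  else
    let rd := rd.setdefault num []
    (adj, rd.insert num (rd.getD num [] ++ [atom]), free)

-- per-atom step; state (adj, ring_dict, cursor, free)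
def outerR (seq : List Int)
    (st : List (Int × Int) × PySem.Dict Int (List Int) × Int × Int) (ap : Int × Int) :
    List (Int × Int) × PySem.Dict Int (List Int) × Int × Int :=
  let (adj, rd, cursor, free) := st
  let (atom, pos) := ap
  let n_children := winW seq (atom, pos)
  let s := (PySem.List.pyRange cursor (cursor + n_children) 1).foldl (stepR seq atom) (adj, rd, free)
  (s.1, s.2.1, cursor + n_children, s.2.2)

-- positive positions of seq from index a on
def posFrom (seq : List Int) (a : Int) : List Int :=
  (PySem.List.pyRange a (seq.length : Int) 1).filter (fun j => PySem.List.pyGetD seq j 0 > 0)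

-- remainder of the file: A = refB (positions fold), then refB = B's staged passes

-- single-step state agreement between A's child-loop body and refB's
lemma step_agree (seq : List Int) (atom : Int) (adj : List (Int × Int))
    (rd : PySem.Dict Int (List Int)) (idxC : Nat) (free : Int) :
    stepA seq atom (adj, rd, idxC, free) 0
      = ((stepR seq atom (adj, rd, free) ((idxC : Int) + 1)).1,
         (stepR seq atom (adj, rd, free) ((idxC : Int) + 1)).2.1, idxC + 1,
         (stepR seq atom (adj, rd, free) ((idxC : Int) + 1)).2.2) := by
  unfold stepA stepR
  simp only []
  have hcast : ((idxC + 1 : Nat) : Int) = (idxC : Int) + 1 := by push_cast; ring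
  rw [hcast]
  set c := PySem.List.pyGetD seq ((idxC : Int) + 1) 0 with hc
  by_cases h1 : c > 0
  · simp [h1]
  · simp only [if_neg h1]
    by_cases h2 : rd.contains c
    · rw [if_pos h2, PySem.Dict.setdefault_of_contains _ _ h2]
    · rw [if_neg h2, PySem.Dict.setdefault_of_not_contains _ _ (by simpa using h2)]
      rw [PySem.Dict.getD_insert_self, PySem.Dict.insert_insert_self]
      simp

-- A's inner child loop agrees with refB's window fold
lemma inner_eq (seq : List Int) (atom : Int) (m : Nat)
    (adj : List (Int × Int)) (rd : PySem.Dict Int (List Int)) (idxC : Nat) (free : Int) :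
    (PySem.List.pyRange 0 (m : Int) 1).foldl (stepA seq atom) (adj, rd, idxC, free)
      = (((PySem.List.pyRange ((idxC : Int) + 1) ((idxC : Int) + 1 + m) 1).foldl
                    (stepR seq atom) (adj, rd, free)).1,
         ((PySem.List.pyRange ((idxC : Int) + 1) ((idxC : Int) + 1 + m) 1).foldl
                    (stepR seq atom) (adj, rd, free)).2.1, idxC + m,
         ((PySem.List.pyRange ((idxC : Int) + 1) ((idxC : Int) + 1 + m) 1).foldl
                    (stepR seq atom) (adj, rd, free)).2.2) := by
  induction m with
  | zero =>
    simp [PySem.List.pyRange_one_eq_nil]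
  | succ n ih =>
    have hA : PySem.List.pyRange 0 ((n : Int) + 1) 1
        = PySem.List.pyRange 0 (n : Int) 1 ++ [(n : Int)] := by
      exact PySem.List.pyRange_one_succ_right (by positivity)
    have hB : PySem.List.pyRange ((idxC : Int) + 1) ((idxC : Int) + 1 + ((n : Int) + 1)) 1
        = PySem.List.pyRange ((idxC : Int) + 1) ((idxC : Int) + 1 + (n : Int)) 1
          ++ [(idxC : Int) + 1 + (n : Int)] := by
      have := PySem.List.pyRange_one_succ_right (a := (idxC : Int) + 1) (b := (idxC : Int) + 1 + (n : Int)) (by omega)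
      rw [← this]; ring_nf
    push_cast
    rw [hA, hB, List.foldl_append, List.foldl_append, ih]
    simp only [List.foldl_cons, List.foldl_nil]
    set F := (PySem.List.pyRange ((idxC : Int) + 1) ((idxC : Int) + 1 + (n : Int)) 1).foldl
      (stepR seq atom) (adj, rd, free) with hF
    have h0 : stepA seq atom (F.1, F.2.1, idxC + n, F.2.2) (n : Int)
        = stepA seq atom (F.1, F.2.1, idxC + n, F.2.2) 0 := rfl
    have h1 := step_agree seq atom F.1 F.2.1 (idxC + n) F.2.2
    have hc2 : (((idxC + n : Nat) : Int)) + 1 = (idxC : Int) + 1 + (n : Int) := by push_cast; ring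
    rw [hc2] at h1
    rw [h0, h1]
    have : idxC + n + 1 = idxC + (n + 1) := by omega
    rw [this]

-- alignment of A's skip loop with the head of posFrom
lemma skip_align_aux (seq : List Int) (hz : (0 : Int) ∉ seq) :
    ∀ (k i : Nat) (r : Int) (rs : List Int), seq.length - i = k →
    posFrom seq (i : Int) = r :: rs →
    (i : Int) ≤ r ∧ 0 ≤ r ∧ r < (seq.length : Int) ∧
    skipNeg seq i = r.toNat ∧ PySem.List.pyGetD seq r 0 > 0 ∧
    posFrom seq (r + 1) = rs := by
  intro k
  induction k using Nat.strong_induction_on with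
  | _ k IH =>
    intro i r rs hk h
    by_cases hi : i < seq.length
    · have hcons := PySem.List.pyRange_one_cons (a := (i : Int)) (b := (seq.length : Int))
        (by exact_mod_cast hi)
      unfold posFrom at h
      rw [hcons, List.filter_cons] at h
      have hget : PySem.List.pyGetD seq (i : Int) 0 = seq[i] := by
        rw [PySem.List.pyGetD_natCast]
        exact List.getD_eq_getElem seq 0 hi
      by_cases hpos : (0 : Int) < seq[i]
      · rw [if_pos (by simp [hget]; omega)] at h
        obtain ⟨hr, hrs⟩ := List.cons.injEq .. ▸ h
        subst hr
        refine ⟨le_refl _, by positivity, by exact_mod_cast hi, ?_, by rw [hget]; exact hpos, ?_⟩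
        · rw [skipNeg, dif_pos hi, if_neg (by omega)]
          simp
        · rw [← hrs]
          unfold posFrom
          norm_cast
      · rw [if_neg (by simp [hget]; omega)] at h
        have hne : seq[i] ≠ 0 := fun h0 => hz (h0 ▸ List.getElem_mem hi)
        have hneg : seq[i] < 0 := by omega
        have h' : posFrom seq ((i + 1 : Nat) : Int) = r :: rs := by
          unfold posFrom; push_cast; exact h
        obtain ⟨h1, h2, h3, h4, h5, h6⟩ :=
          IH (seq.length - (i + 1)) (by omega) (i + 1) r rs rfl h'
        refine ⟨by push_cast at h1 ⊢; omega, h2, h3, ?_, h5, h6⟩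
        rw [skipNeg, dif_pos hi, if_pos hneg]
        exact h4
    · unfold posFrom at h
      rw [PySem.List.pyRange_one_eq_nil (by exact_mod_cast Nat.le_of_not_lt hi)] at h
      simp at h

lemma skip_align (seq : List Int) (hz : (0 : Int) ∉ seq) (i : Nat) (r : Int) (rs : List Int)
    (h : posFrom seq (i : Int) = r :: rs) :
    (i : Int) ≤ r ∧ 0 ≤ r ∧ r < (seq.length : Int) ∧
    skipNeg seq i = r.toNat ∧ PySem.List.pyGetD seq r 0 > 0 ∧
    posFrom seq (r + 1) = rs :=
  skip_align_aux seq hz (seq.length - i) i r rs rfl h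

-- A's main loop = refB's positions fold
lemma loop_eq (seq : List Int) (hz : (0 : Int) ∉ seq)
    (rest : List Int) (n_atoms : Int) (adj : List (Int × Int))
    (rd : PySem.Dict Int (List Int)) (idxP idxC : Nat) (atom free : Int)
    (hrest : posFrom seq (idxP : Int) = rest)
    (hn : n_atoms = atom + rest.length) :
    loopA seq n_atoms adj rd idxP idxC atom free
      = (((PySem.List.enumerate rest atom).foldl (outerR seq)
                    (adj, rd, (idxC : Int) + 1, free)).1,
         ((PySem.List.enumerate rest atom).foldl (outerR seq)
                    (adj, rd, (idxC : Int) + 1, free)).2.1) := by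
  induction rest generalizing n_atoms adj rd idxP idxC atom free with
  | nil =>
    rw [loopA, dif_neg (by simp only [List.length_nil] at hn; omega)]
    simp [PySem.List.enumerate_nil]
  | cons r rs ih =>
    obtain ⟨h1, h2, h3, h4, h5, h6⟩ := skip_align seq hz idxP r rs hrest
    have hlen : idxP < seq.length := by
      have : (idxP : Int) < (seq.length : Int) := lt_of_le_of_lt h1 h3
      exact_mod_cast this
    have hatom : atom < n_atoms := by
      simp only [List.length_cons] at hn; omega
    rw [loopA, dif_pos ⟨hlen, hatom⟩]
    simp only [h4]
    have hr : ((r.toNat : Nat) : Int) = r := Int.toNat_of_nonneg h2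
    rw [hr]
    set deg := PySem.List.pyGetD seq r 0 with hdeg
    set parentless : Int := if atom == 0 then 1 else 0 with hpl
    have hplnn : 0 ≤ deg - 1 + parentless := by
      by_cases h0 : atom == 0 <;> simp [hpl, h0] <;> omega
    set m : Nat := (deg - 1 + parentless).toNat with hmdef
    have hm : deg - 1 + parentless = (m : Int) := by omega
    rw [hm, inner_eq seq atom m adj rd idxC free]
    have hrest' : posFrom seq ((r.toNat + 1 : Nat) : Int) = rs := by
      push_cast [hr]; exact h6
    have hn' : n_atoms = (atom + 1) + rs.length := by
      simp only [List.length_cons] at hn; push_cast [hn]; ring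
    rw [ih _ _ _ _ _ _ _ hrest' hn']
    rw [PySem.List.enumerate_cons, List.foldl_cons]
    unfold outerR
    simp only []
    have hnc : winW seq (atom, r) = (m : Int) := by
      show (if (atom == 0) = true then PySem.List.pyGetD seq r 0
            else PySem.List.pyGetD seq r 0 - 1) = (m : Int)
      rw [← hm, ← hdeg, hpl]
      by_cases h0 : atom == 0 <;> simp [h0]
    rw [hnc]
    have hcur : ((idxC + m : Nat) : Int) + 1 = ((idxC : Int) + 1) + (m : Int) := by
      push_cast; ring
    rw [hcur]

-- the final dict has Nodup keys
lemma nodup_keys_loopA (seq : List Int) (n_atoms : Int) (adj : List (Int × Int))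
    (rd : PySem.Dict Int (List Int)) (idxP idxC : Nat) (atom free : Int)
    (h : rd.keys.Nodup) :
    (loopA seq n_atoms adj rd idxP idxC atom free).2.keys.Nodup := by
  fun_induction loopA seq n_atoms adj rd idxP idxC atom free with
  | case1 adj rd idxP idxC atom free hguard p deg parentless s ih =>
    apply ih
    clear ih
    have : ∀ (l : List Int) (st : List (Int × Int) × PySem.Dict Int (List Int) × Nat × Int),
        st.2.1.keys.Nodup → ((l.foldl (stepA seq atom) st).2.1).keys.Nodup := by
      intro l
      induction l with
      | nil => intro st hst; exact hst
      | cons x xs ihl =>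
        intro st hst
        rw [List.foldl_cons]
        apply ihl
        obtain ⟨a0, r0, i0, f0⟩ := st
        unfold stepA
        simp only []
        split_ifs <;> simp_all [PySem.Dict.nodup_keys_insert]
    exact this _ _ h
  | case2 => exact h

lemma floordiv_two (n : Nat) : PySem.Int.floordiv (n : Int) 2 = ((n / 2 : Nat) : Int) := by
  simp [PySem.Int.floordiv]
  rw [Int.fdiv_eq_ediv]
  simp

-- A's index-pair loop over one ring list = pairUp
lemma pairUp_range (v : List Int) :
    (List.range (v.length / 2)).map (fun k => (v.getD (2 * k) 0, v.getD (2 * k + 1) 0))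
      = pairUp v := by
  fun_induction pairUp v with
  | case1 a b t ih =>
    have hl : (a :: b :: t).length / 2 = t.length / 2 + 1 := by simp; omega
    rw [hl, List.range_succ_eq_map, List.map_cons, List.map_map]
    show ((a :: b :: t).getD (2 * 0) 0, (a :: b :: t).getD (2 * 0 + 1) 0) :: _
        = (a, b) :: pairUp t
    refine congr_arg₂ List.cons (by simp) ?_
    rw [← ih]
    apply List.map_congr_left
    intro k _
    simp only [Function.comp_apply]
    have h1 : 2 * (k + 1) = (2 * k + 1) + 1 := by omega
    rw [h1]
    simp only [List.getD_cons_succ]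
  | case2 v h =>
    cases v with
    | nil => rfl
    | cons a w =>
      cases w with
      | nil => simp
      | cons b t => exact absurd rfl (h a b t)

lemma pairs_eq (v : List Int) (adj : List (Int × Int)) :
    (PySem.List.pyRange 0 (PySem.Int.floordiv ((v.length : Int)) 2) 1).foldl
      (fun adj i => adj ++ [(PySem.List.pyGetD v (2 * i) 0,
                             PySem.List.pyGetD v (2 * i + 1) 0)]) adj
    = adj ++ pairUp v := by
  rw [PySem.List.foldl_append_singleton_eq_map
      (fun i => (PySem.List.pyGetD v (2 * i) 0, PySem.List.pyGetD v (2 * i + 1) 0))]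
  rw [floordiv_two, PySem.List.pyRange_zero_natCast, List.map_map]
  rw [← pairUp_range]
  congr 1
  apply List.map_congr_left
  intro k _
  simp only [Function.comp_apply]
  have h2 : ((2 * k : Nat) : Int) + 1 = ((2 * k + 1 : Nat) : Int) := by push_cast; ring
  rw [show (2 : Int) * (k : Int) = ((2 * k : Nat) : Int) by push_cast; ring, h2,
    PySem.List.pyGetD_natCast, PySem.List.pyGetD_natCast]

-- A's ring loop over keys = B's ring loop over values
lemma rings_eq (rd : PySem.Dict Int (List Int)) (hnd : rd.keys.Nodup) (adj : List (Int × Int)) :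
    rd.keys.foldl (fun adj k =>
      let ring_atoms := rd.getD k []
      (PySem.List.pyRange 0 (PySem.Int.floordiv ((ring_atoms.length : Int)) 2) 1).foldl
        (fun adj i => adj ++ [(PySem.List.pyGetD ring_atoms (2 * i) 0,
                               PySem.List.pyGetD ring_atoms (2 * i + 1) 0)]) adj) adj
    = rd.values.foldl (fun adj ring_atoms => adj ++ pairUp ring_atoms) adj := by
  rw [PySem.Dict.values_eq_map_keys rd hnd [], List.foldl_map]
  induction rd.keys generalizing adj with
  | nil => rfl
  | cons k ks ih =>
    rw [List.foldl_cons, List.foldl_cons, ih]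
    congr 1
    exact pairs_eq (rd.getD k []) adj

-- n_atoms = number of positive positions
lemma n_atoms_eq (seq : List Int) :
    (seq.map (fun num => if num > 0 then (1 : Int) else 0)).sum = ((posFrom seq 0).length : Int) := by
  have h1 : (fun num : Int => if num > 0 then (1 : Int) else 0)
      = (fun num : Int => if (decide (0 < num)) = true then (1 : Int) else 0) := by
    funext n; simp
  rw [h1, PySem.List.sum_map_ite_one_zero]
  have h2 : (posFrom seq 0).length
      = (((PySem.List.pyRange 0 (seq.length : Int) 1).map (fun j => PySem.List.pyGetD seq j 0)).filter
          (fun x => decide (0 < x))).length := by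
    rw [List.filter_map, List.length_map]; rfl
  rw [h2]
  have h3 := PySem.List.map_pyGetD_pyRange_zero seq 0
  simp only [PySem.List.len] at h3
  rw [h3]; simp [List.countP_eq_length_filter]

-- ---- refB = B's staged passes ----

-- one window: refB's range fold = B's zip fold over the corresponding slice
lemma window_eq (seq : List Int) (a : Int) (n : Nat) (c : Int) (hc : 0 ≤ c)
    (hn : c + n ≤ (seq.length : Int))
    (st : List (Int × Int) × PySem.Dict Int (List Int) × Int) :
    (PySem.List.pyRange c (c + n) 1).foldl (stepR seq a) st
      = ((List.replicate n a).zip ((seq.drop c.toNat).take n)).foldl zstepB st := by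
  induction n with
  | zero => simp [PySem.List.pyRange_one_eq_nil]
  | succ m ih =>
    have hm : c + (m : Int) ≤ (seq.length : Int) := by push_cast at hn ⊢; omega
    have hidx : c.toNat + m < seq.length := by omega
    have hr : PySem.List.pyRange c (c + ((m : Int) + 1)) 1
        = PySem.List.pyRange c (c + (m : Int)) 1 ++ [c + (m : Int)] := by
      have := PySem.List.pyRange_one_succ_right (a := c) (b := c + (m : Int)) (by omega)
      rw [← this]; ring_nf
    have hrep : List.replicate (m + 1) a = List.replicate m a ++ [a] :=
      List.replicate_succ' ..
    have hlt : m < (seq.drop c.toNat).length := by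
      rw [List.length_drop]; omega
    have htake : (seq.drop c.toNat).take (m + 1)
        = (seq.drop c.toNat).take m ++ [(seq.drop c.toNat)[m]] :=
      by
      rw [List.take_add_one, List.getElem?_eq_getElem hlt]; rfl
    push_cast
    rw [hr, hrep, htake, List.zip_append (by simp [List.length_take]; omega),
      List.foldl_append, List.foldl_append, ih hm]
    simp only [List.zip_cons_cons, List.zip_nil_right, List.foldl_cons, List.foldl_nil]
    set G := ((List.replicate m a).zip ((seq.drop c.toNat).take m)).foldl zstepB st
    show stepR seq a G (c + m) = zstepB G (a, (seq.drop c.toNat)[m])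
    have hget : PySem.List.pyGetD seq (c + (m : Int)) 0 = (seq.drop c.toNat)[m] := by
      rw [PySem.List.pyGetD_eq_getElem seq 0 (by omega) (by omega)]
      rw [List.getElem_drop]
      congr 1
      omega
    unfold stepR zstepB
    rw [hget]


-- the whole positions fold = the zip fold over the flattened parents table
lemma main_eq (seq : List Int) (L : List (Int × Int)) (c : Int) (hc : 0 ≤ c)
    (HW : ∀ x ∈ L, 0 ≤ winW seq x)
    (Hsum : c + (L.map (winW seq)).sum ≤ (seq.length : Int))
    (adj : List (Int × Int)) (rd : PySem.Dict Int (List Int)) (free : Int) :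
    ((L.foldl (outerR seq) (adj, rd, c, free)).1,
     (L.foldl (outerR seq) (adj, rd, c, free)).2.1)
      = ((((L.flatMap (fun x => List.replicate (winW seq x).toNat x.1)).zip
            (seq.drop c.toNat)).foldl zstepB (adj, rd, free)).1,
         (((L.flatMap (fun x => List.replicate (winW seq x).toNat x.1)).zip
            (seq.drop c.toNat)).foldl zstepB (adj, rd, free)).2.1) := by
  induction L generalizing c adj rd free with
  | nil => simp
  | cons x L' ih =>
    have hw0 : 0 ≤ winW seq x := HW x (List.mem_cons_self ..)
    have hrest : 0 ≤ (L'.map (winW seq)).sum :=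
      List.sum_nonneg (by
        intro y hy
        obtain ⟨z, hz, rfl⟩ := List.mem_map.mp hy
        exact HW z (List.mem_cons_of_mem _ hz))
    have hsum' : c + winW seq x + (L'.map (winW seq)).sum ≤ (seq.length : Int) := by
      simp only [List.map_cons, List.sum_cons] at Hsum; omega
    set n : Nat := (winW seq x).toNat with hn
    have hwn : winW seq x = (n : Int) := by omega
    -- A side
    rw [List.foldl_cons]
    have houter : outerR seq (adj, rd, c, free) x
        = (((PySem.List.pyRange c (c + winW seq x) 1).foldl (stepR seq x.1) (adj, rd, free)).1,
           ((PySem.List.pyRange c (c + winW seq x) 1).foldl (stepR seq x.1) (adj, rd, free)).2.1,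
           c + winW seq x,
           ((PySem.List.pyRange c (c + winW seq x) 1).foldl (stepR seq x.1) (adj, rd, free)).2.2) := rfl
    rw [houter, hwn, window_eq seq x.1 n c hc (by omega)]
    -- B side
    rw [List.flatMap_cons]
    have hdropsplit : seq.drop c.toNat
        = (seq.drop c.toNat).take n ++ (seq.drop c.toNat).drop n := (List.take_append_drop ..).symm
    have hlenrep : (List.replicate n x.1).length = ((seq.drop c.toNat).take n).length := by
      simp [List.length_take, List.length_drop]; omega
    conv_rhs => rw [hdropsplit]
    rw [List.zip_append hlenrep, List.foldl_append]
    have hdd : (seq.drop c.toNat).drop n = seq.drop (c + (n : Int)).toNat := by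
      rw [List.drop_drop]
      congr 1
      omega
    rw [hdd]
    exact ih (c + n) (by omega) (fun z hz => HW z (List.mem_cons_of_mem _ hz))
      (by rw [hwn] at hsum'; omega) _ _ _


-- pass 1 of B builds exactly the flattened parents table
lemma parents_fold (l : List Int) (acc : List Int) (k : Int) :
    (l.foldl pstepB (acc, k)).1
      = acc ++ (PySem.List.enumerate (l.filter (fun t => t > 0)) (k + 1)).flatMap
          (fun x => List.replicate (if x.1 == 0 then x.2 else x.2 - 1).toNat x.1) := by
  induction l generalizing acc k with
  | nil => simp [PySem.List.enumerate_nil]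
  | cons t rest ih =>
    rw [List.foldl_cons, List.filter_cons]
    by_cases ht : t > 0
    · rw [if_pos (by simpa using ht)]
      rw [PySem.List.enumerate_cons, List.flatMap_cons]
      have hstep : pstepB (acc, k) t
          = (acc ++ PySem.List.pyRepeat [k + 1] (if k + 1 == 0 then t else t - 1), k + 1) := by
        unfold pstepB; rw [if_pos ht]
      rw [hstep, ih, List.append_assoc, PySem.List.pyRepeat_singleton]
    · rw [if_neg (by simpa using ht)]
      have hstep : pstepB (acc, k) t = (acc, k) := by
        unfold pstepB; rw [if_neg ht]
      rw [hstep, ih]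


lemma enumerate_map {α β : Type} (f : α → β) (l : List α) (s : Int) :
    PySem.List.enumerate (l.map f) s = (PySem.List.enumerate l s).map (fun p => (p.1, f p.2)) := by
  induction l generalizing s with
  | nil => simp [PySem.List.enumerate_nil]
  | cons a t ih => simp [PySem.List.enumerate_cons, ih]

lemma mem_enumerate {α : Type} (l : List α) (s : Int) (x : Int × α)
    (h : x ∈ PySem.List.enumerate l s) : x.2 ∈ l := by
  induction l generalizing s with
  | nil => simp [PySem.List.enumerate_nil] at h
  | cons a t ih =>
    rw [PySem.List.enumerate_cons] at h
    rcases List.mem_cons.mp h with h | h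
    · subst h; simp
    · exact List.mem_cons_of_mem _ (ih _ h)

lemma map_filter_comp {α β : Type} (f : α → β) (p : β → Bool) (l : List α) :
    (l.filter (fun x => p (f x))).map f = (l.map f).filter p := by
  induction l with
  | nil => simp
  | cons a t ih =>
    simp only [List.filter_cons, List.map_cons]
    by_cases h : p (f a) <;> simp [h, ih]

-- positive tokens = values of seq at its positive positions
lemma posTokens_eq (seq : List Int) :
    (posFrom seq 0).map (fun p => PySem.List.pyGetD seq p 0) = seq.filter (fun t => t > 0) := by
  unfold posFrom
  rw [map_filter_comp (fun j => PySem.List.pyGetD seq j 0) (fun t => decide (t > 0))]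
  have h3 := PySem.List.map_pyGetD_pyRange_zero seq 0
  simp only [PySem.List.len] at h3
  rw [h3]

-- parents table in enumerate-positions form
lemma parents_eq (seq : List Int) :
    (seq.foldl pstepB ([], -1)).1
      = (PySem.List.enumerate (posFrom seq 0) 0).flatMap
          (fun x => List.replicate (winW seq x).toNat x.1) := by
  rw [parents_fold]
  show (PySem.List.enumerate (seq.filter (fun t => t > 0)) (-1 + 1)).flatMap _ = _
  rw [show (-1 + 1 : Int) = 0 by omega, ← posTokens_eq seq, enumerate_map, List.flatMap_map]
  congr 1

lemma sum_enum_shift (l : List Int) (k : Int) (hk : 1 ≤ k) :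
    ((PySem.List.enumerate l k).map (fun x : Int × Int => if x.1 == 0 then x.2 else x.2 - 1)).sum
      = l.sum - l.length := by
  induction l generalizing k with
  | nil => simp [PySem.List.enumerate_nil]
  | cons t rest ih =>
    rw [PySem.List.enumerate_cons, List.map_cons, List.sum_cons, ih (k + 1) (by omega)]
    have hk0 : (k == 0) = false := by simp; omega
    simp only [hk0]
    push_cast [List.sum_cons, List.length_cons]
    ring

lemma sum_map_eq_sum_filter (seq : List Int) :
    (seq.map (fun num => if num > 0 then num else 0)).sum = (seq.filter (fun t => t > 0)).sum := by
  induction seq with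
  | nil => simp
  | cons a t ih =>
    simp only [List.map_cons, List.sum_cons, List.filter_cons]
    by_cases h : a > 0 <;> simp [h, ih]

lemma len_split (seq : List Int) (hz : (0 : Int) ∉ seq) :
    (seq.filter (fun num => num < 0)).length + (seq.filter (fun t => t > 0)).length
      = seq.length := by
  induction seq with
  | nil => simp
  | cons a t ih =>
    have ha : a ≠ 0 := fun h => hz (by simp [h])
    have ih' := ih (fun h => hz (List.mem_cons_of_mem _ h))
    simp only [List.filter_cons, List.length_cons]
    simp only [gt_iff_lt] at ih' ⊢
    rcases lt_trichotomy a 0 with h | h | h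
    · simp [h, not_lt.mpr (le_of_lt h)]
      omega
    · exact absurd h ha
    · simp [h, not_lt.mpr (le_of_lt h)]
      omega

lemma ok_sum (seq : List Int) (hok : seq_is_ok seq = true) :
    (seq.map (fun num => if num > 0 then num else 0)).sum
      = 2 * (seq.length : Int) - ((seq.filter (fun num => num < 0)).length : Int) - 2 := by
  unfold seq_is_ok at hok
  simp only [] at hok
  split_ifs at hok with h1 h2
  exact not_ne_iff.mp h1

-- windows transferred to token form
lemma win_transfer (seq : List Int) :
    (PySem.List.enumerate (posFrom seq 0) 0).map (winW seq)
      = (PySem.List.enumerate (seq.filter (fun t => t > 0)) 0).map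
          (fun x : Int × Int => if x.1 == 0 then x.2 else x.2 - 1) := by
  rw [← posTokens_eq seq, enumerate_map, List.map_map]
  congr 1

-- arithmetic: under seq_is_ok and no zeros, the windows fit inside the sequence
lemma sum_fit (seq : List Int) (hok : seq_is_ok seq = true) (hz : (0 : Int) ∉ seq) :
    1 + ((PySem.List.enumerate (posFrom seq 0) 0).map (winW seq)).sum ≤ (seq.length : Int) := by
  have hs := ok_sum seq hok
  rw [sum_map_eq_sum_filter] at hs
  have hl := len_split seq hz
  rw [win_transfer]
  cases hpt : seq.filter (fun t => t > 0) with
  | nil =>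
    rw [hpt] at hs hl
    simp only [PySem.List.enumerate_nil, List.map_nil, List.sum_nil, List.length_nil,
      List.sum_nil] at hs hl ⊢
    omega
  | cons t rest =>
    rw [hpt] at hs hl
    rw [PySem.List.enumerate_cons, List.map_cons, List.sum_cons]
    simp only [zero_add]
    rw [sum_enum_shift rest 1 (le_refl 1)]
    simp only [List.sum_cons, List.length_cons] at hs hl
    norm_num
    omega

-- ===== VERDICT (by name: the statement is the Claim_ definition above) =====
theorem seq_to_adj_spec : Claim_equal_seq_to_adj := by
  intro seq _hdom hz
  unfold Spec_seq_to_adj seq_to_adj seq_to_adj_alt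
  by_cases hok : seq_is_ok seq = true
  · have key := loop_eq seq hz (posFrom seq 0) _ [] PySem.Dict.empty 0 0 0 0 rfl
      (by push_cast [← n_atoms_eq]; ring)
    have hnd := nodup_keys_loopA seq
      ((seq.map (fun num => if num > 0 then (1 : Int) else 0)).sum)
      [] PySem.Dict.empty 0 0 0 0 (by simp [PySem.Dict.keys, PySem.Dict.empty])
    rw [key] at hnd
    simp only [Nat.cast_zero, zero_add] at key hnd
    have HW : ∀ x ∈ PySem.List.enumerate (posFrom seq 0) 0, 0 ≤ winW seq x := by
      intro x hx
      have hmem : x.2 ∈ posFrom seq 0 := mem_enumerate _ _ _ hx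
      have hpos : PySem.List.pyGetD seq x.2 0 > 0 := by
        have := (List.mem_filter.mp hmem).2
        simpa using this
      unfold winW
      split <;> omega
    have Hsum : (1 : Int) + ((PySem.List.enumerate (posFrom seq 0) 0).map (winW seq)).sum
        ≤ (seq.length : Int) := sum_fit seq hok hz
    have hmain := main_eq seq (PySem.List.enumerate (posFrom seq 0) 0) 1 (by omega) HW
      (by omega) [] PySem.Dict.empty 0
    simp only [hok, Bool.not_true, Bool.false_eq_true, if_false]
    rw [key]
    rw [parents_eq seq, PySem.List.slice_from_one, ← List.drop_one]
    have h1 : ((1 : Int)).toNat = 1 := rfl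
    rw [show seq.drop 1 = seq.drop ((1 : Int)).toNat from rfl] at *
    obtain ⟨e1, e2⟩ := Prod.mk.injEq .. ▸ hmain
    rw [rings_eq _ (e2 ▸ hnd), e1, e2]
  · simp only [Bool.not_eq_true] at hok
    simp [hok]
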